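-- pv_equiv track=rewrite | github.com/louspringer/tidb-agentx-hackathon | final_syntax_fix.py | is_in_function_context
-- ===== SOURCE A (Python) =====
-- from typing import List, Dict
--
-- def is_in_function_context(line_num: int, all_lines: List[str]) -> bool:
--     """Check if we're inside a function or class definition"""
--     for i in range(line_num - 1, -1, -1):
--         line = all_lines[i].strip()
--         if line.startswith(('def ', 'class ')):
--             return True
--         elif line.startswith(('import ', 'from ')):
--             return False
--     return False
-- ===== SOURCE B (Python) =====
-- def is_in_function_context(line_num, all_lines):
--     """Forward single pass: last def/class vs import/from marker before line_num wins."""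
--     result = False
--     for i in range(line_num):
--         line = all_lines[i].strip()
--         if line.startswith(('def ', 'class ')):
--             result = True
--         elif line.startswith(('import ', 'from ')):
--             result = False
--     return result
-- ===== Notes on version B (the rewrite author's own statement) =====
-- stated objective: alternative
-- what changed: Replaces A's backward short-circuiting scan (first marker hit from line_num-1 down) with a forward accumulating pass over lines 0..line_num-1 whose last marker hit determines the result.
import Mathlib
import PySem

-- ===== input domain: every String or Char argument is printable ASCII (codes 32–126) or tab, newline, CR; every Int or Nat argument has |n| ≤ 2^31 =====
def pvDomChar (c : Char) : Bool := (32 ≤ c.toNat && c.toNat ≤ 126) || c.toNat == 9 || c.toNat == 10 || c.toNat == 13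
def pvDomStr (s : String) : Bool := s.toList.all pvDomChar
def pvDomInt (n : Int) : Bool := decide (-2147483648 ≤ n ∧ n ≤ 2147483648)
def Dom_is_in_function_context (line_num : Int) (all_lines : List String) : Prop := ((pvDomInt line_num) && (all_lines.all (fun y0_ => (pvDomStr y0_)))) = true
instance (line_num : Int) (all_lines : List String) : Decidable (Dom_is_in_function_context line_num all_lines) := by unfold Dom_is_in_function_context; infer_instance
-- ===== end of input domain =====

-- B replaces A's backward short-circuiting scan with a forward accumulating pass (alternative decomposition, same cost).

-- ===== PORT A =====
-- backward loop of A: first line starting with 'def '/'class ' → True, 'import '/'from ' → False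
def pvALoop (all_lines : List String) : List Int → Bool
  | [] => false
  | i :: rest =>
    let line := PySem.Str.strip ((PySem.List.pyGet? all_lines i).getD "")
    if PySem.Str.startswith line "def " || PySem.Str.startswith line "class " then true
    else if PySem.Str.startswith line "import " || PySem.Str.startswith line "from " then false
    else pvALoop all_lines rest

def is_in_function_context (line_num : Int) (all_lines : List String) : Bool :=
  pvALoop all_lines (PySem.List.pyRange (line_num - 1) (-1) (-1))

-- ===== PORT B =====
def is_in_function_context_alt (line_num : Int) (all_lines : List String) : Bool :=
  (PySem.List.pyRange 0 line_num 1).foldl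
    (fun result i =>
      let line := PySem.Str.strip ((PySem.List.pyGet? all_lines i).getD "")
      if PySem.Str.startswith line "def " || PySem.Str.startswith line "class " then true
      else if PySem.Str.startswith line "import " || PySem.Str.startswith line "from " then false
      else result)
    false

-- ===== PRECONDITION & SPEC =====
-- A indexes all_lines[line_num-1] first, so it raises IndexError whenever line_num exceeds len(all_lines)
def Pre_is_in_function_context (line_num : Int) (all_lines : List String) : Prop :=
  line_num ≤ (all_lines.length : Int)
instance (line_num : Int) (all_lines : List String) : Decidable (Pre_is_in_function_context line_num all_lines) := by unfold Pre_is_in_function_context; infer_instance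

def pvWitness_is_in_function_context : Int × List String := (2, ["def f():", "    return 1"])

def Spec_is_in_function_context (line_num : Int) (all_lines : List String) (out : Bool) : Prop := out = is_in_function_context_alt line_num all_lines
instance (line_num : Int) (all_lines : List String) (out : Bool) : Decidable (Spec_is_in_function_context line_num all_lines out) := by unfold Spec_is_in_function_context; infer_instance

-- ===== CLAIM (what is proved, stated in full; the proofs are below) =====
def Claim_equal_is_in_function_context : Prop := ∀ (line_num : Int) (all_lines : List String), Dom_is_in_function_context line_num all_lines → Pre_is_in_function_context line_num all_lines → Spec_is_in_function_context line_num all_lines (is_in_function_context line_num all_lines)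

-- ===== LEMMAS AND PROOFS =====

-- backward first-hit over l.reverse equals forward last-hit fold over l
theorem pvALoop_reverse_eq_foldl (all_lines : List String) (l : List Int) :
    pvALoop all_lines l.reverse =
      l.foldl
        (fun result i =>
          let line := PySem.Str.strip ((PySem.List.pyGet? all_lines i).getD "")
          if PySem.Str.startswith line "def " || PySem.Str.startswith line "class " then true
          else if PySem.Str.startswith line "import " || PySem.Str.startswith line "from " then false
          else result)
        false := by
  induction l using List.reverseRecOn with
  | nil => rfl
  | append_singleton l i ih =>
    rw [List.reverse_append, List.reverse_singleton, List.singleton_append,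
        List.foldl_append]
    simp only [List.foldl_cons, List.foldl_nil, pvALoop]
    split_ifs <;> simp_all

theorem is_in_function_context_spec : Claim_equal_is_in_function_context := by
  intro line_num all_lines _ _
  unfold Spec_is_in_function_context is_in_function_context is_in_function_context_alt
  by_cases h : line_num ≤ 0
  · rw [PySem.List.pyRange_neg_one_eq_nil (by omega), PySem.List.pyRange_one_eq_nil (by omega)]
    rfl
  · have : PySem.List.pyRange (line_num - 1) (-1) (-1)
        = (PySem.List.pyRange 0 line_num 1).reverse := by
      rw [PySem.List.pyRange_neg_one_eq_reverse]
      norm_num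
    rw [this, pvALoop_reverse_eq_foldl]
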